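-- pv_equiv track=rewrite | github.com/cainweideman/archieven | basic_extract.py | process_sentences
-- ===== SOURCE A (Python) =====
-- def process_sentences(sentences):
-- 	# Processed list to store combined sentences
-- 	processed_sentences = []
-- 	current_sentence = ""  # To build the current sentence group
--
-- 	for i, sentence in enumerate(sentences):
-- 		# Check if the current sentence has '(' or ')'
-- 		if '(' in sentence or ')' in sentence:
-- 			# If there's a current combined sentence, add it to the list
-- 			if current_sentence:
-- 				processed_sentences.append(current_sentence.strip())
--
-- 			# Start a new sentence group with the current sentence
-- 			current_sentence = sentence
-- 		else:
-- 			# Append sentence without parentheses to the current sentence group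
-- 			current_sentence += " " + sentence
--
-- 	# Add the last accumulated sentence if any
-- 	if current_sentence:
-- 		processed_sentences.append(current_sentence.strip())
--
-- 	return processed_sentences
-- ===== SOURCE B (Python) =====
-- def _split_first_group(rest):
--     """Split rest into (maximal parenthesis-free prefix, remainder)."""
--     for i, s in enumerate(rest):
--         if '(' in s or ')' in s:
--             return rest[:i], rest[i:]
--     return rest, []
--
-- def process_sentences(sentences):
--     # Recursive decomposition: peel off the first group (head sentence plus the
--     # following parenthesis-free run), join it with spaces, recurse on the rest.
--     if not sentences:
--         return []
--     pre, post = _split_first_group(sentences[1:])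
--     return [' '.join(sentences[:1] + pre).strip()] + process_sentences(post)
-- ===== Notes on version B (the rewrite author's own statement) =====
-- stated objective: alternative
-- what changed: Replaces A's single-pass string accumulator with flush logic by a recursive decomposition that splits off the first group (head sentence plus its parenthesis-free run) and joins each group with ' '.join before stripping.
import Mathlib
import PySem

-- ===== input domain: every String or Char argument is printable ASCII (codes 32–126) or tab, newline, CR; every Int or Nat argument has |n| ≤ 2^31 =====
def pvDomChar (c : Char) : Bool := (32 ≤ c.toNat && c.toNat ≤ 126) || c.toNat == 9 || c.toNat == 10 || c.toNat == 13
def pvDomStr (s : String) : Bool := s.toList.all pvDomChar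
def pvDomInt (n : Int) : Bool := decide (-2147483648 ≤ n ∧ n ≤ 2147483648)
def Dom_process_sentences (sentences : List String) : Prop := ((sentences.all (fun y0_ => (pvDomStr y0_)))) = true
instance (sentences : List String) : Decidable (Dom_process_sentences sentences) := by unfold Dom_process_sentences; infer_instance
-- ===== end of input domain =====

-- B replaces A's running string-accumulator with a recursive split into a first group and the rest (alternative decomposition, same cost).


-- "'(' in sentence or ')' in sentence"
def hasParen (s : String) : Bool := PySem.Str.isIn "(" s || PySem.Str.isIn ")" s

-- ===== PORT A =====
-- the for-loop carries the state (processed_sentences, current_sentence)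
def process_sentences (sentences : List String) : List String :=
  let r := sentences.foldl (fun (st : List String × String) sentence =>
    if hasParen sentence then
      (if st.2 ≠ "" then st.1 ++ [PySem.Str.strip st.2] else st.1, sentence)
    else
      (st.1, st.2 ++ " " ++ sentence)) ([], "")
  if r.2 ≠ "" then r.1 ++ [PySem.Str.strip r.2] else r.1

-- ===== PORT B =====
-- _split_first_group: the enumerate loop as structural recursion
def splitFirstGroup : List String → List String × List String
  | [] => ([], [])
  | s :: r =>
    if hasParen s then ([], s :: r)
    else
      let p := splitFirstGroup r
      (s :: p.1, p.2)

theorem splitFirstGroup_snd_length_le (l : List String) :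
    (splitFirstGroup l).2.length ≤ l.length := by
  induction l with
  | nil => simp [splitFirstGroup]
  | cons s r ih =>
    simp only [splitFirstGroup]
    split
    · simp
    · exact Nat.le_succ_of_le ih

def process_sentences_alt (sentences : List String) : List String :=
  match sentences with
  | [] => []
  | s :: t =>
    let p := splitFirstGroup t
    PySem.Str.strip (PySem.Str.join " " (s :: p.1)) :: process_sentences_alt p.2
termination_by sentences.length
decreasing_by
  simpa using Nat.lt_succ_of_le (splitFirstGroup_snd_length_le t)

-- ===== PRECONDITION & SPEC =====
def Spec_process_sentences (sentences : List String) (out : List String) : Prop := out = process_sentences_alt sentences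
instance (sentences : List String) (out : List String) : Decidable (Spec_process_sentences sentences out) := by unfold Spec_process_sentences; infer_instance

-- ===== CLAIM (what is proved, stated in full; the proofs are below) =====
def Claim_equal_process_sentences : Prop := ∀ (sentences : List String), Dom_process_sentences sentences → Spec_process_sentences sentences (process_sentences sentences)

-- ===== LEMMAS AND PROOFS =====

-- the loop body of A, named for the proofs
def stepA (st : List String × String) (sentence : String) : List String × String :=
  if hasParen sentence then
    (if st.2 ≠ "" then st.1 ++ [PySem.Str.strip st.2] else st.1, sentence)
  else
    (st.1, st.2 ++ " " ++ sentence)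

-- the string A's accumulator holds after absorbing a parenthesis-free run g onto c
def extendStr (c : String) (g : List String) : String :=
  g.foldl (fun a s => a ++ " " ++ s) c

theorem hasParen_ne_empty {s : String} (h : hasParen s = true) : s ≠ "" := by
  intro he; subst he; revert h; decide

theorem append_space_ne_empty (c s : String) : c ++ " " ++ s ≠ "" := by
  intro h
  have : (c ++ " " ++ s).toList = ([] : List Char) := by rw [h]; rfl
  simp [String.toList_append] at this

theorem extendStr_append (c x : String) (g : List String) :
    extendStr (c ++ " " ++ x) g = c ++ " " ++ extendStr x g := by
  induction g generalizing x with
  | nil => rfl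
  | cons y ys ih =>
    simp only [extendStr, List.foldl_cons] at *
    rw [show (c ++ " " ++ x) ++ " " ++ y = c ++ " " ++ (x ++ " " ++ y) by
      apply String.toList_inj.mp; simp [String.toList_append]]
    exact ih (x ++ " " ++ y)

theorem join_eq_extendStr (c : String) (g : List String) :
    PySem.Str.join " " (c :: g) = extendStr c g := by
  induction g generalizing c with
  | nil =>
    apply String.toList_inj.mp
    simp [PySem.Str.toList_join, PySem.Chars.join_singleton, extendStr]
  | cons x xs ih =>
    have h1 : PySem.Str.join " " (c :: x :: xs) = c ++ " " ++ PySem.Str.join " " (x :: xs) := by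
      apply String.toList_inj.mp
      simp [PySem.Str.toList_join, PySem.Chars.join_cons_cons, String.toList_append]
    rw [h1, ih]
    simp only [extendStr, List.foldl_cons]
    exact (extendStr_append c x xs).symm

theorem extendStr_space (s : String) (g : List String) :
    extendStr (" " ++ s) g = " " ++ extendStr s g := by
  induction g generalizing s with
  | nil => rfl
  | cons x xs ih =>
    simp only [extendStr, List.foldl_cons] at *
    rw [show (" " ++ s) ++ " " ++ x = " " ++ (s ++ " " ++ x) by
      apply String.toList_inj.mp; simp [String.toList_append]]
    exact ih (s ++ " " ++ x)

theorem strip_space (s : String) :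
    PySem.Str.strip (" " ++ s) = PySem.Str.strip s := by
  apply String.toList_inj.mp
  simp [PySem.Str.toList_strip, String.toList_append, PySem.Chars.strip, PySem.Chars.lstrip,
    show (" " : String).toList = [' '] from rfl,    show PySem.Chars.isspace ' ' = true from rfl]

-- main loop invariant: with a non-empty accumulator, A's remaining loop + final flush
-- produce the stripped extension of the accumulator over the paren-free run, then B's groups
theorem loopA_inv (l : List String) :
    ∀ (proc : List String) (cur : String), cur ≠ "" →
    (let r := l.foldl stepA (proc, cur)
     if r.2 ≠ "" then r.1 ++ [PySem.Str.strip r.2] else r.1)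
    = proc ++ PySem.Str.strip (extendStr cur (splitFirstGroup l).1)
        :: process_sentences_alt (splitFirstGroup l).2 := by
  induction l with
  | nil =>
    intro proc cur hc
    simp [splitFirstGroup, extendStr, process_sentences_alt, hc]
  | cons s rest ih =>
    intro proc cur hc
    by_cases hp : hasParen s = true
    · have hs : s ≠ "" := hasParen_ne_empty hp
      simp only [List.foldl_cons, stepA, hp, if_pos, hc, ne_eq, not_false_eq_true, splitFirstGroup]
      rw [ih (proc ++ [PySem.Str.strip cur]) s hs]
      simp only [process_sentences_alt, join_eq_extendStr]
      simp [extendStr]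
    · simp only [List.foldl_cons, stepA, hp, if_false, Bool.false_eq_true, splitFirstGroup]
      rw [ih proc (cur ++ " " ++ s) (append_space_ne_empty cur s)]
      rfl

-- ===== VERDICT (by name: the statement is the Claim_ definition above) =====
theorem process_sentences_spec : Claim_equal_process_sentences := by
  intro sentences _
  unfold Spec_process_sentences
  cases sentences with
  | nil => simp [process_sentences, process_sentences_alt]
  | cons s t =>
    show (let r := (s :: t).foldl stepA ([], "")
          if r.2 ≠ "" then r.1 ++ [PySem.Str.strip r.2] else r.1) = _
    by_cases hp : hasParen s = true
    · simp only [List.foldl_cons, stepA, hp, ite_true, ne_eq, not_true_eq_false, ite_false]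
      rw [loopA_inv t [] s (hasParen_ne_empty hp)]
      simp [process_sentences_alt, join_eq_extendStr]
    · simp only [List.foldl_cons, stepA, hp, Bool.false_eq_true, ite_false]
      rw [loopA_inv t [] ("" ++ " " ++ s) (append_space_ne_empty "" s)]
      have he : ("" ++ " " ++ s) = " " ++ s := by
        apply String.toList_inj.mp; simp [String.toList_append]
      rw [he, extendStr_space, strip_space]
      simp [process_sentences_alt, join_eq_extendStr]
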